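-- pv_equiv track=rewrite | github.com/caicaiya123/DreamVLA | examples/libero_plus/main.py | _parse_task_ids
-- ===== SOURCE A (Python) =====
-- from typing import Optional, List, Set, Dict, Any, Tuple
--
-- def _parse_task_ids(expr: Optional[str], upper: int) -> List[int]:
--     """
--     Parse expressions like "5", "10-20", "0,7,10-12" into a sorted, de-duplicated
--     list of integer task ids within [0, upper-1]. Ranges are inclusive.
--     """
--     if expr is None or str(expr).strip() == "":
--         return list(range(upper))
--     s = str(expr).replace(" ", "")
--     out: Set[int] = set()
--     parts = [p for p in s.split(",") if p != ""]
--     for part in parts: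
--         if "-" in part:
--             a, b = part.split("-", 1)
--             try:
--                 start = int(a); end = int(b)
--             except ValueError:
--                 raise ValueError(f'Invalid range "{part}" in --args.task-ids.')
--             if start > end:
--                 start, end = end, start
--             for i in range(start, end + 1):
--                 if 0 <= i < upper:
--                     out.add(i)
--                 else:
--                     raise ValueError(
--                         f"Task id {i} out of range [0, {upper-1}] for suite (from range {part})."
--                     )
--         else:
--             try:
--                 i = int(part)
--             except ValueError:
--                 raise ValueError(f'Invalid id "{part}" in --args.task-ids.')
--             if 0 <= i < upper:
--                 out.add(i)
--             else:
--                 raise ValueError(f"Task id {i} out of range [0, {upper-1}] for suite.")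
--     return sorted(out)
-- ===== SOURCE B (Python) =====
-- from typing import Optional, List
--
-- def _parse_task_ids(expr: Optional[str], upper: int) -> List[int]:
--     if expr is None or str(expr).strip() == "":
--         return list(range(upper))
--     s = str(expr).replace(" ", "")
--     intervals = []
--     for part in s.split(","):
--         if part == "":
--             continue
--         if "-" in part:
--             a, b = part.split("-", 1)
--             try:
--                 lo, hi = int(a), int(b)
--             except ValueError:
--                 raise ValueError(f'Invalid range "{part}" in --args.task-ids.')
--             if lo > hi:
--                 lo, hi = hi, lo
--             if lo < 0 or hi >= upper:
--                 bad = lo if lo < 0 else max(lo, upper)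
--                 raise ValueError(
--                     f"Task id {bad} out of range [0, {upper-1}] for suite (from range {part})."
--                 )
--             intervals.append((lo, hi))
--         else:
--             try:
--                 i = int(part)
--             except ValueError:
--                 raise ValueError(f'Invalid id "{part}" in --args.task-ids.')
--             if not (0 <= i < upper):
--                 raise ValueError(f"Task id {i} out of range [0, {upper-1}] for suite.")
--             intervals.append((i, i))
--     return [i for i in range(upper) if any(lo <= i <= hi for lo, hi in intervals)]
-- ===== Notes on version B (the rewrite author's own statement) =====
-- stated objective: alternative
-- what changed: B validates each part once into a (lo,hi) interval (a single bound check per part instead of A's per-id loop into a set) and builds the result by filtering range(upper) against the interval list, so no set and no sort is needed.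
import Mathlib
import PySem

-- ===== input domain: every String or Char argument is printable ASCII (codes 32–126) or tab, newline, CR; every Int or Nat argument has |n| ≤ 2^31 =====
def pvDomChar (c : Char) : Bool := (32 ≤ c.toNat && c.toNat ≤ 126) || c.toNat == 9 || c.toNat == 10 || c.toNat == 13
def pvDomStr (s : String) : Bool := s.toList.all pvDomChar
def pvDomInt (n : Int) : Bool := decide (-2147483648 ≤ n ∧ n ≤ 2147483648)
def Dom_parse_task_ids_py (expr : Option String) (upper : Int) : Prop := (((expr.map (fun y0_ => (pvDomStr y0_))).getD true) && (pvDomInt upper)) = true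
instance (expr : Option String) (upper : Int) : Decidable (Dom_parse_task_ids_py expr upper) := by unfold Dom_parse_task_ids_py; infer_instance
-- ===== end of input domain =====

-- B replaces A's per-id set-building loop by per-part validated intervals and a filter of
-- range(upper); equivalence of return values on all non-raising inputs (objective: alternative).

-- ===== PORT A =====
-- for i in range(start, end+1): bound-check-or-raise, out.add(i)   (none = ValueError)
def pyA_rangeLoop (upper : Int) (out : PySem.Set Int) : List Int → Option (PySem.Set Int)
  | [] => some out
  | i :: rest =>
    if 0 ≤ i ∧ i < upper then pyA_rangeLoop upper (PySem.Set.add out i) rest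
    else none

-- body of A's for-loop for one part (none = any of A's raises)
def pyA_part (upper : Int) (out : PySem.Set Int) (part : String) : Option (PySem.Set Int) :=
  if PySem.Str.isIn "-" part then
    match PySem.Str.splitMax? part "-" 1 with
    | some (a :: b :: _) =>
      match PySem.Int.ofStr? a, PySem.Int.ofStr? b with
      | some s0, some e0 =>
        let p := if s0 > e0 then (e0, s0) else (s0, e0)
        pyA_rangeLoop upper out (PySem.List.pyRange p.1 (p.2 + 1) 1)
      | _, _ => none
    | _ => none
  else
    match PySem.Int.ofStr? part with
    | some i => if 0 ≤ i ∧ i < upper then some (PySem.Set.add out i) else none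
    | none => none

def pyA_loop (upper : Int) (out : PySem.Set Int) : List String → Option (PySem.Set Int)
  | [] => some out
  | p :: ps =>
    match pyA_part upper out p with
    | some out' => pyA_loop upper out' ps
    | none => none

def parse_task_ids_py (expr : Option String) (upper : Int) : List Int :=
  match expr with
  | none => PySem.List.pyRange 0 upper 1
  | some e =>
    if PySem.Str.strip e = "" then PySem.List.pyRange 0 upper 1
    else
      let s := PySem.Str.replace e " " ""
      let parts := (((PySem.Str.split? s ",").getD [])).filter (fun p => !(p == ""))
      match pyA_loop upper PySem.Set.empty parts with
      | some out => PySem.List.sorted out (fun x => x) false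
      | none => []   -- A raises here; excluded by Pre_

-- ===== PORT B =====
-- one part -> validated inclusive interval (none = B's raises)
def pyB_interval (upper : Int) (part : String) : Option (Int × Int) :=
  if PySem.Str.isIn "-" part then
    match PySem.Str.splitMax? part "-" 1 with
    | some (a :: b :: _) =>
      match PySem.Int.ofStr? a, PySem.Int.ofStr? b with
      | some lo0, some hi0 =>
        let p := if lo0 > hi0 then (hi0, lo0) else (lo0, hi0)
        if p.1 < 0 ∨ p.2 ≥ upper then none else some p
      | _, _ => none
    | _ => none
  else
    match PySem.Int.ofStr? part with
    | some i => if 0 ≤ i ∧ i < upper then some (i, i) else none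
    | none => none

def pyB_intervals (upper : Int) : List String → Option (List (Int × Int))
  | [] => some []
  | p :: ps =>
    if p = "" then pyB_intervals upper ps
    else
      match pyB_interval upper p with
      | some iv => (pyB_intervals upper ps).map (fun ivs => iv :: ivs)
      | none => none

def parse_task_ids_py_alt (expr : Option String) (upper : Int) : List Int :=
  match expr with
  | none => PySem.List.pyRange 0 upper 1
  | some e =>
    if PySem.Str.strip e = "" then PySem.List.pyRange 0 upper 1
    else
      let s := PySem.Str.replace e " " ""
      match pyB_intervals upper (((PySem.Str.split? s ",").getD [])) with
      | some ivs =>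
        (PySem.List.pyRange 0 upper 1).filter
          (fun i => ivs.any (fun iv => decide (iv.1 ≤ i) && decide (i ≤ iv.2)))
      | none => []   -- B raises here; excluded by Pre_

-- ===== PRECONDITION & SPEC =====
-- a non-empty part parses and lies entirely within [0, upper)
def pvPartOK (upper : Int) (part : String) : Bool :=
  if PySem.Str.isIn "-" part then
    match PySem.Str.splitMax? part "-" 1 with
    | some (a :: b :: _) =>
      match PySem.Int.ofStr? a, PySem.Int.ofStr? b with
      | some lo, some hi => decide (0 ≤ min lo hi) && decide (max lo hi < upper)
      | _, _ => false
    | _ => false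
  else
    match PySem.Int.ofStr? part with
    | some i => decide (0 ≤ i) && decide (i < upper)
    | none => false

-- Pre_ excludes exactly the inputs on which A raises ValueError: a part that is not an
-- int / int-int, or an id (or range endpoint) outside [0, upper).
def Pre_parse_task_ids_py (expr : Option String) (upper : Int) : Prop :=
  match expr with
  | none => True
  | some e =>
    PySem.Str.strip e = "" ∨
      ((((PySem.Str.split? (PySem.Str.replace e " " "") ",").getD [])).all
        (fun p => (p == "") || pvPartOK upper p)) = true

instance (expr : Option String) (upper : Int) : Decidable (Pre_parse_task_ids_py expr upper) := by
  unfold Pre_parse_task_ids_py; cases expr <;> infer_instance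

def pvWitness_parse_task_ids_py : Option String × Int := (some "0, 7-9 ,3", 10)

def Spec_parse_task_ids_py (expr : Option String) (upper : Int) (out : List Int) : Prop := out = parse_task_ids_py_alt expr upper
instance (expr : Option String) (upper : Int) (out : List Int) : Decidable (Spec_parse_task_ids_py expr upper out) := by unfold Spec_parse_task_ids_py; infer_instance

-- ===== CLAIM (what is proved, stated in full; the proofs are below) =====
def Claim_equal_parse_task_ids_py : Prop := ∀ (expr : Option String) (upper : Int), Dom_parse_task_ids_py expr upper → Pre_parse_task_ids_py expr upper → Spec_parse_task_ids_py expr upper (parse_task_ids_py expr upper)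

-- ===== LEMMAS AND PROOFS =====

theorem pyA_rangeLoop_eq (upper : Int) : ∀ (l : List Int) (out : PySem.Set Int),
    (∀ i ∈ l, 0 ≤ i ∧ i < upper) →
    pyA_rangeLoop upper out l = some (l.foldl PySem.Set.add out)
  | [], _, _ => rfl
  | i :: rest, out, h => by
    rw [pyA_rangeLoop, if_pos (h i (by simp))]
    exact pyA_rangeLoop_eq upper rest _ (fun j hj => h j (by simp [hj]))

theorem nodup_foldl_add : ∀ (l : List Int) (out : PySem.Set Int),
    out.Nodup → (l.foldl PySem.Set.add out).Nodup
  | [], _, h => h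
  | i :: rest, out, h => nodup_foldl_add rest _ (PySem.Set.nodup_add out i h)

theorem mem_foldl_add' (l : List Int) (out : PySem.Set Int) (x : Int) :
    x ∈ l.foldl PySem.Set.add out ↔ x ∈ out ∨ x ∈ l := by
  have := PySem.Set.mem_foldl_add (f := fun (b : Int) => b) (l := l) (s := out) (y := x)
  simpa using this

theorem pyA_part_eq (upper : Int) (part : String) (out : PySem.Set Int)
    (h : pvPartOK upper part = true) :
    ∃ lo hi, pyB_interval upper part = some (lo, hi) ∧
      0 ≤ lo ∧ lo ≤ hi ∧ hi < upper ∧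
      pyA_part upper out part =
        some ((PySem.List.pyRange lo (hi + 1) 1).foldl PySem.Set.add out) := by
  unfold pvPartOK at h
  unfold pyA_part pyB_interval
  by_cases hin : PySem.Str.isIn "-" part = true
  · simp only [hin, if_true] at h ⊢
    rcases hsp : PySem.Str.splitMax? part "-" 1 with _ | l
    · rw [hsp] at h; exact absurd h (by simp)
    · rw [hsp] at h
      match l with
      | [] => exact absurd h (by simp)
      | [a] => exact absurd h (by simp)
      | a :: b :: rest =>
        dsimp only at h ⊢
        rcases ha : PySem.Int.ofStr? a with _ | lo0
        · rw [ha] at h; exact absurd h (by simp)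
        rcases hb : PySem.Int.ofStr? b with _ | hi0
        · rw [ha, hb] at h; exact absurd h (by simp)
        rw [ha, hb] at h
        dsimp only at h ⊢
        simp only [Bool.and_eq_true, decide_eq_true_eq] at h
        obtain ⟨h0, hu⟩ := h
        have hsw : (if lo0 > hi0 then (hi0, lo0) else (lo0, hi0)) = (min lo0 hi0, max lo0 hi0) := by
          split_ifs with hc <;> simp [Prod.ext_iff] <;> omega
        rw [hsw]
        refine ⟨min lo0 hi0, max lo0 hi0, ?_, h0, le_max_of_le_left (min_le_left _ _), hu, ?_⟩
        · rw [if_neg (by simp; omega)]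
        · exact pyA_rangeLoop_eq upper _ out (by
            intro i hi
            rw [PySem.List.mem_pyRange_one] at hi
            constructor <;> omega)
  · simp only [Bool.not_eq_true] at hin
    simp only [hin, Bool.false_eq_true, if_false] at h ⊢
    rcases hp : PySem.Int.ofStr? part with _ | i
    · rw [hp] at h; exact absurd h (by simp)
    rw [hp] at h
    dsimp only at h ⊢
    simp only [Bool.and_eq_true, decide_eq_true_eq] at h
    refine ⟨i, i, by rw [if_pos ⟨h.1, h.2⟩], h.1, le_refl i, h.2, ?_⟩
    rw [if_pos ⟨h.1, h.2⟩, PySem.List.pyRange_one_singleton]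
    rfl

theorem pyAB_loop_eq (upper : Int) : ∀ (l : List String) (out : PySem.Set Int),
    l.all (fun p => (p == "") || pvPartOK upper p) = true → out.Nodup →
    ∃ S ivs, pyA_loop upper out (l.filter (fun p => !(p == ""))) = some S ∧
      pyB_intervals upper l = some ivs ∧ S.Nodup ∧
      (∀ iv ∈ ivs, 0 ≤ iv.1 ∧ iv.1 ≤ iv.2 ∧ iv.2 < upper) ∧
      (∀ x, x ∈ S ↔ x ∈ out ∨ ∃ iv ∈ ivs, iv.1 ≤ x ∧ x ≤ iv.2)
  | [], out, _, hnd =>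
    ⟨out, [], rfl, rfl, hnd, by simp, by simp⟩
  | p :: l, out, hall, hnd => by
    simp only [List.all_cons, Bool.and_eq_true, Bool.or_eq_true, beq_iff_eq] at hall
    obtain ⟨hp, hrest⟩ := hall
    by_cases he : p = ""
    · obtain ⟨S, ivs, h1, h2, h3, h4, h5⟩ := pyAB_loop_eq upper l out hrest hnd
      refine ⟨S, ivs, ?_, ?_, h3, h4, h5⟩
      · simpa [List.filter_cons, he] using h1
      · rw [pyB_intervals, if_pos he]; exact h2
    · have hok : pvPartOK upper p = true := by tauto
      obtain ⟨lo, hi, hB, hlo, hlohi, hhi, hA⟩ := pyA_part_eq upper p out hok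
      have hnd' : ((PySem.List.pyRange lo (hi + 1) 1).foldl PySem.Set.add out).Nodup :=
        nodup_foldl_add _ _ hnd
      obtain ⟨S, ivs, h1, h2, h3, h4, h5⟩ :=
        pyAB_loop_eq upper l ((PySem.List.pyRange lo (hi + 1) 1).foldl PySem.Set.add out) hrest hnd'
      refine ⟨S, (lo, hi) :: ivs, ?_, ?_, h3, ?_, ?_⟩
      · rw [List.filter_cons, if_pos (by simp [he]), pyA_loop, hA]
        exact h1
      · rw [pyB_intervals, if_neg he, hB, h2]; rfl
      · intro iv hiv
        rcases List.mem_cons.mp hiv with h | h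
        · subst h; exact ⟨hlo, hlohi, hhi⟩
        · exact h4 iv h
      · intro x
        rw [h5 x, mem_foldl_add', PySem.List.mem_pyRange_one]
        constructor
        · rintro ((hx | hx) | ⟨iv, hiv, hx⟩)
          · exact Or.inl hx
          · exact Or.inr ⟨(lo, hi), by simp, by constructor <;> omega⟩
          · exact Or.inr ⟨iv, by simp [hiv], hx⟩
        · rintro (hx | ⟨iv, hiv, hx⟩)
          · exact Or.inl (Or.inl hx)
          · rcases List.mem_cons.mp hiv with h | h
            · subst h; exact Or.inl (Or.inr (by constructor <;> omega))
            · exact Or.inr ⟨iv, h, hx⟩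

-- ===== VERDICT (by name: the statement is the Claim_ definition above) =====
theorem parse_task_ids_py_spec : Claim_equal_parse_task_ids_py := by
  intro expr upper _ hpre
  unfold Spec_parse_task_ids_py
  cases expr with
  | none => rfl
  | some e =>
    unfold parse_task_ids_py parse_task_ids_py_alt
    dsimp only
    by_cases hs : PySem.Str.strip e = ""
    · rw [if_pos hs, if_pos hs]
    · rw [if_neg hs, if_neg hs]
      unfold Pre_parse_task_ids_py at hpre
      rcases hpre with hpre | hpre
      · exact absurd hpre hs
      obtain ⟨S, ivs, h1, h2, h3, h4, h5⟩ :=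
        pyAB_loop_eq upper ((PySem.Str.split? (PySem.Str.replace e " " "") ",").getD []) PySem.Set.empty hpre
          List.nodup_nil
      rw [h1, h2]
      have hndR : ((PySem.List.pyRange 0 upper 1).filter
          (fun i => ivs.any (fun iv => decide (iv.1 ≤ i) && decide (i ≤ iv.2)))).Nodup :=
        (PySem.List.nodup_pyRange_one 0 upper).filter _
      have hperm : ((PySem.List.pyRange 0 upper 1).filter
          (fun i => ivs.any (fun iv => decide (iv.1 ≤ i) && decide (i ≤ iv.2)))).Perm S := by
        rw [List.perm_ext_iff_of_nodup hndR h3]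
        intro x
        rw [List.mem_filter, PySem.List.mem_pyRange_one, h5 x]
        simp only [List.any_eq_true, Bool.and_eq_true, decide_eq_true_eq, PySem.Set.empty,
          List.not_mem_nil, false_or]
        constructor
        · rintro ⟨_, iv, hiv, hx⟩; exact ⟨iv, hiv, hx⟩
        · rintro ⟨iv, hiv, hx⟩
          have := h4 iv hiv
          exact ⟨⟨by omega, by omega⟩, iv, hiv, hx⟩
      have hpw : ((PySem.List.pyRange 0 upper 1).filter
          (fun i => ivs.any (fun iv => decide (iv.1 ≤ i) && decide (i ≤ iv.2)))).Pairwise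
            (fun a b => (fun x => x) a < (fun x => x) b) :=
        (PySem.List.pairwise_lt_pyRange_one 0 upper).filter _
      exact PySem.List.sorted_eq_of_perm_of_pairwise_lt _ _ _ hperm hpw
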